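-- pv_equiv track=rewrite | github.com/seandeward/Port-Scanner | TEST/test.py | group_tasks_by_owner
-- ===== SOURCE A (Python) =====
-- def group_tasks_by_owner(tasks):
--   result_dict = {}
--   for task in tasks:
--     owner = task['owner']
--     title = task['title']
--     if owner not in result_dict:
--       result_dict[owner] = []
--     result_dict[owner].append(title)
--   return result_dict
-- ===== SOURCE B (Python) =====
-- def group_tasks_by_owner(tasks):
--   owners = list(dict.fromkeys(t['owner'] for t in tasks))
--   return {o: [t['title'] for t in tasks if t['owner'] == o] for o in owners}
-- ===== Notes on version B (the rewrite author's own statement) =====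
-- stated objective: alternative
-- what changed: Replaces the single-pass incremental dict building (membership test, seed [], append) by a two-phase decomposition: first dedup the owners in first-appearance order, then build the whole dict in one comprehension with a per-owner filter over the tasks.
import Mathlib
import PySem

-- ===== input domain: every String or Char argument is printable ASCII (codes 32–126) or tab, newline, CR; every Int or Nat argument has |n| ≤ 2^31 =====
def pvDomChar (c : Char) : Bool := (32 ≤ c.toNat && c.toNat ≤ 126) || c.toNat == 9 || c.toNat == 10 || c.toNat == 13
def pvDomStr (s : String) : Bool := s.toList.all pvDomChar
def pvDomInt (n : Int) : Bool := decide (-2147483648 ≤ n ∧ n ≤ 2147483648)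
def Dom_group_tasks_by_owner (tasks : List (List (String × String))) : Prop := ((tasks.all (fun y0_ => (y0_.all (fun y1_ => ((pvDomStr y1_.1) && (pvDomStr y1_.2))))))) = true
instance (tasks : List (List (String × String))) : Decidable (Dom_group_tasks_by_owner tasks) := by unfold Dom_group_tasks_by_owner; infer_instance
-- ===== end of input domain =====

-- B groups by a two-phase decomposition (dedup owners, then one filtering comprehension per
-- owner) instead of A's single-pass incremental dict building; same result, not faster.

-- shared helper: task['key'] on an association-list task dict (first match), as Option
def pvLookup (task : List (String × String)) (k : String) : Option String :=
  (PySem.Dict.mk task).get? k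

-- ===== PORT A =====
def group_tasks_by_owner (tasks : List (List (String × String))) : List (String × List String) :=
  (tasks.foldl (fun d task =>
      let owner := (pvLookup task "owner").getD ""      -- Pre_ guarantees the lookup succeeds
      let title := (pvLookup task "title").getD ""      -- Pre_ guarantees the lookup succeeds
      let d := if d.contains owner then d else d.insert owner []
      d.modify owner [] (fun l => l ++ [title]))        -- result_dict[owner].append(title); key present after the if
    PySem.Dict.empty).items

-- ===== PORT B =====
def group_tasks_by_owner_alt (tasks : List (List (String × String))) : List (String × List String) :=
  let owners : PySem.Set String :=
    PySem.Set.ofList (tasks.map (fun t => (pvLookup t "owner").getD ""))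
  owners.map (fun o =>
    (o, (tasks.filter (fun t => (pvLookup t "owner").getD "" == o)).map
          (fun t => (pvLookup t "title").getD "")))

-- ===== PRECONDITION & SPEC =====
-- Pre_ excludes exactly the inputs where a task lacks an 'owner' or 'title' key, on which A raises KeyError.
def Pre_group_tasks_by_owner (tasks : List (List (String × String))) : Prop :=
  ∀ t ∈ tasks, (pvLookup t "owner").isSome ∧ (pvLookup t "title").isSome
instance (tasks : List (List (String × String))) : Decidable (Pre_group_tasks_by_owner tasks) := by unfold Pre_group_tasks_by_owner; infer_instance

def pvWitness_group_tasks_by_owner : (List (List (String × String))) :=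
  [[("owner", "ann"), ("title", "scan")], [("owner", "bob"), ("title", "report")], [("owner", "ann"), ("title", "fix")]]

def Spec_group_tasks_by_owner (tasks : List (List (String × String))) (out : List (String × List String)) : Prop := out = group_tasks_by_owner_alt tasks
instance (tasks : List (List (String × String))) (out : List (String × List String)) : Decidable (Spec_group_tasks_by_owner tasks out) := by unfold Spec_group_tasks_by_owner; infer_instance

-- ===== CLAIM (what is proved, stated in full; the proofs are below) =====
def Claim_equal_group_tasks_by_owner : Prop := ∀ (tasks : List (List (String × String))), Dom_group_tasks_by_owner tasks → Pre_group_tasks_by_owner tasks → Spec_group_tasks_by_owner tasks (group_tasks_by_owner tasks)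

-- ===== LEMMAS AND PROOFS =====

-- A's loop body (membership test, seed [], append) is one modify with default [].
theorem pv_stepA_eq_modify (d : PySem.Dict String (List String)) (o t : String) :
    (let d' := if d.contains o then d else d.insert o [];
     d'.modify o [] (fun l => l ++ [t])) = d.modify o [] (fun l => l ++ [t]) := by
  by_cases h : d.contains o
  · simp [h]
  · simp only [Bool.not_eq_true] at h
    simp only [h, Bool.false_eq_true, if_false, PySem.Dict.modify,
      PySem.Dict.insert_insert_self, PySem.Dict.getD_insert_self,
      PySem.Dict.getD_of_not_contains d ([] : List String) h]

theorem group_tasks_by_owner_spec' (tasks : List (List (String × String))) :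
    group_tasks_by_owner tasks = group_tasks_by_owner_alt tasks := by
  unfold group_tasks_by_owner group_tasks_by_owner_alt
  have hstep : (tasks.foldl (fun d task =>
      let owner := (pvLookup task "owner").getD ""
      let title := (pvLookup task "title").getD ""
      let d := if d.contains owner then d else d.insert owner []
      d.modify owner [] (fun l => l ++ [title])) PySem.Dict.empty)
      = tasks.foldl (fun d task =>
          d.modify ((pvLookup task "owner").getD "") [] (fun l => l ++ [(pvLookup task "title").getD ""]))
          PySem.Dict.empty := by
    apply PySem.List.foldl_congr_mem
    intro d task _
    exact pv_stepA_eq_modify d _ _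
  rw [hstep]
  set D := tasks.foldl (fun d task =>
      d.modify ((pvLookup task "owner").getD "") [] (fun l => l ++ [(pvLookup task "title").getD ""]))
      PySem.Dict.empty with hD
  have hnd : D.keys.Nodup := by
    rw [hD]
    exact PySem.Dict.nodup_keys_foldl_modify_key tasks
      (fun task => (pvLookup task "owner").getD "") []
      (fun _ task => fun l => l ++ [(pvLookup task "title").getD ""]) _
      PySem.Dict.nodup_keys_empty
  have hkeys : D.keys = PySem.Set.ofList (tasks.map (fun t => (pvLookup t "owner").getD "")) := by
    rw [hD, PySem.Dict.keys_foldl_modify_key]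
    simp [PySem.Dict.keys_empty, PySem.Set.update_nil_left]
  have hgetD : ∀ o : String, D.getD o [] =
      (tasks.filter (fun t => (pvLookup t "owner").getD "" == o)).map
        (fun t => (pvLookup t "title").getD "") := by
    intro o
    have hfold : D = (tasks.map (fun t => ((pvLookup t "owner").getD "", (pvLookup t "title").getD ""))).foldl
        (fun d p => d.modify p.1 [] (fun l => l ++ [p.2])) PySem.Dict.empty := by
      rw [hD, List.foldl_map]
    rw [hfold, PySem.Dict.getD_foldl_modify_append]
    simp [PySem.Dict.getD_empty, List.filter_map, Function.comp_def]
  rw [PySem.Dict.items_eq_map_keys D hnd [], hkeys]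
  apply List.map_congr_left
  intro o _
  rw [hgetD o]

-- ===== VERDICT (by name: the statement is the Claim_ definition above) =====
theorem group_tasks_by_owner_spec : Claim_equal_group_tasks_by_owner := by
  intro tasks _ _
  unfold Spec_group_tasks_by_owner
  exact group_tasks_by_owner_spec' tasks
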